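-- pv_equiv track=rewrite | github.com/pypi-data/pypi-mirror-195 | packages/macal/macal-4.0.77-py3-none-any.whl/macal/lexer.py | applyEscapes
-- ===== SOURCE A (Python) =====
-- def applyEscapes(source: str) -> str:
--     index = 0
--     length = len(source)
--     destination = ''
--     while index < length:
--         if source[index] == '\\' and index+1 < length:
--             if (source[index+1] in ['a','b','n','r','t','0']):
--                 if source[index+1] == 'a': destination=f"{destination}\a"
--                 elif source[index+1] == 'b': destination=f"{destination}\b"
--                 elif source[index+1] == 'n': destination=f"{destination}\n"
--                 elif source[index+1] == 'r': destination=f"{destination}\r"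
--                 elif source[index+1] == 't': destination=f"{destination}\t"
--                 else: destination=f"{destination}\0"
--             else: destination = f"{destination}{source[index+1]}"
--             index += 1
--         else: destination=f"{destination}{source[index]}"
--         index += 1
--     return destination
-- ===== SOURCE B (Python) =====
-- _ESC = {'a': '\a', 'b': '\b', 'n': '\n', 'r': '\r', 't': '\t', '0': '\0'}
--
-- def applyEscapes(source: str) -> str:
--     # Staged: split on backslashes, then reassemble the pieces.
--     # Each piece after the first starts with the escaped character; an empty
--     # piece means the escaped character was itself a backslash (consume the
--     # following piece verbatim) or a lone trailing backslash.
--     parts = source.split('\\')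
--     out = [parts[0]]
--     i = 1
--     n = len(parts)
--     while i < n:
--         p = parts[i]
--         if p:
--             out.append(_ESC.get(p[0], p[0]) + p[1:])
--             i += 1
--         elif i + 1 < n:
--             out.append('\\' + parts[i + 1])
--             i += 2
--         else:
--             out.append('\\')
--             i += 1
--     return ''.join(out)
-- ===== Notes on version B (the rewrite author's own statement) =====
-- stated objective: faster
-- what changed: The char-by-char index loop with an elif chain and quadratic string concatenation is replaced by a staged algorithm: split the source on backslashes once, then reassemble the pieces (each non-first piece starts with the escaped character, an empty piece encodes an escaped or trailing backslash), joining at the end.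
import Mathlib
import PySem

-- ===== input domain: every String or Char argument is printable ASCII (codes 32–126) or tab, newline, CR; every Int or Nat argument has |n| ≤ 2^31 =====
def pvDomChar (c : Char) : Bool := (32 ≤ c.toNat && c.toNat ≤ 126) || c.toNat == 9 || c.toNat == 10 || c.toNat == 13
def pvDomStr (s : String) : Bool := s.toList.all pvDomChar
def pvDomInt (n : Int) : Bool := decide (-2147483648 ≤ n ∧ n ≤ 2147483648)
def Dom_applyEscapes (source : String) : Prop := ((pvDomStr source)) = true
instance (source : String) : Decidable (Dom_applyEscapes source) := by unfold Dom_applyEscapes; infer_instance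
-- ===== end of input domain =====

-- B replaces A's index loop + elif chain + quadratic string concatenation by a staged
-- split-on-backslash / reassemble / join algorithm (measured faster in a timing run).

-- ===== PORT A =====
-- A's while loop over an index, accumulating `destination`; the accumulator is kept
-- as List Char (PySem strings are lists of chars) and wrapped by String.ofList at the end.
def applyEscapesGo (cs : List Char) (index : Nat) (destination : List Char) : List Char :=
  if h : index < cs.length then
    if h2 : cs[index] = '\\' ∧ index + 1 < cs.length then
      let d :=
        if cs[index + 1]'(h2.2) = 'a' then destination ++ ['\x07']
        else if cs[index + 1]'(h2.2) = 'b' then destination ++ ['\x08']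
        else if cs[index + 1]'(h2.2) = 'n' then destination ++ ['\n']
        else if cs[index + 1]'(h2.2) = 'r' then destination ++ ['\r']
        else if cs[index + 1]'(h2.2) = 't' then destination ++ ['\t']
        else if cs[index + 1]'(h2.2) = '0' then destination ++ ['\x00']
        else destination ++ [cs[index + 1]'(h2.2)]
      applyEscapesGo cs (index + 2) d
    else
      applyEscapesGo cs (index + 1) (destination ++ [cs[index]])
  else destination
termination_by cs.length - index
decreasing_by all_goals omega

def applyEscapes (source : String) : String :=
  String.ofList (applyEscapesGo source.toList 0 [])

-- ===== PORT B =====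
-- the _ESC dict of Source B (values are 1-char strings, kept as Chars)
def pvEscMap : PySem.Dict Char Char :=
  PySem.Dict.mk [('a', '\x07'), ('b', '\x08'), ('n', '\n'), ('r', '\r'), ('t', '\t'), ('0', '\x00')]

-- Source B's while loop over parts[1:]: a non-empty part contributes its mapped first
-- char plus the rest; an empty part is an escaped backslash (consume the next part
-- verbatim) or a lone trailing backslash.
def applyEscapesAltJoin : List (List Char) → List Char
  | [] => []
  | p :: rest =>
    if p ≠ [] then
      (PySem.Dict.getD pvEscMap (p.headI) (p.headI) :: p.tail) ++ applyEscapesAltJoin rest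
    else
      match rest with
      | q :: rest' => ('\\' :: q) ++ applyEscapesAltJoin rest'
      | [] => ['\\']

-- parts = source.split('\\'); out = [parts[0]] then the loop; ''.join(out)
def applyEscapes_alt (source : String) : String :=
  match PySem.Chars.splitOn source.toList ['\\'] with
  | [] => String.ofList []   -- unreachable: split never returns an empty list
  | p0 :: rest => String.ofList (p0 ++ applyEscapesAltJoin rest)

-- ===== PRECONDITION & SPEC =====
def Spec_applyEscapes (source : String) (out : String) : Prop := out = applyEscapes_alt source
instance (source : String) (out : String) : Decidable (Spec_applyEscapes source out) := by unfold Spec_applyEscapes; infer_instance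

-- ===== CLAIM (what is proved, stated in full; the proofs are below) =====
def Claim_equal_applyEscapes : Prop := ∀ (source : String), Dom_applyEscapes source → Spec_applyEscapes source (applyEscapes source)

-- ===== LEMMAS AND PROOFS =====

-- proof-only reference one-pass recursion: A's result, computed front-to-back
def pvRef : List Char → List Char
  | [] => []
  | c :: rest =>
    if c = '\\' then
      match rest with
      | [] => [c]
      | n :: rest' => PySem.Dict.getD pvEscMap n n :: pvRef rest'
    else c :: pvRef rest

-- proof-only reference for splitOn on ['\\']
def pvSplit : List Char → List (List Char)
  | [] => [[]]
  | c :: rest =>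
    if c = '\\' then [] :: pvSplit rest
    else
      match pvSplit rest with
      | [] => [[c]]
      | p :: ps => (c :: p) :: ps

theorem getD_pvEscMap (c : Char) : PySem.Dict.getD pvEscMap c c =
    if c = 'a' then '\x07' else if c = 'b' then '\x08' else if c = 'n' then '\n'
    else if c = 'r' then '\x0d' else if c = 't' then '\t' else if c = '0' then '\x00' else c := by
  rw [PySem.Dict.getD_eq_get?_getD]
  simp only [pvEscMap, PySem.Dict.get?_mk_cons, beq_iff_eq]
  split_ifs <;> simp_all [PySem.Dict.get?, List.find?, eq_comm]

theorem pvRef_cons_ne (c : Char) (rest : List Char) (h : ¬ c = '\\') :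
    pvRef (c :: rest) = c :: pvRef rest := by
  rw [pvRef.eq_def]; simp [h]

theorem pvRef_bs_cons (n : Char) (rest : List Char) :
    pvRef ('\\' :: n :: rest) = PySem.Dict.getD pvEscMap n n :: pvRef rest := by
  rw [pvRef.eq_def]; simp

-- A's loop equals the reference one-pass recursion
theorem applyEscapesGo_eq (n : Nat) :
    ∀ (cs : List Char) (index : Nat) (dest : List Char), cs.length - index ≤ n →
      applyEscapesGo cs index dest = dest ++ pvRef (cs.drop index) := by
  induction n with
  | zero =>
    intro cs index dest h
    rw [applyEscapesGo, dif_neg (by omega), List.drop_eq_nil_of_le (by omega)]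
    simp [pvRef]
  | succ n ih =>
    intro cs index dest h
    by_cases hlt : index < cs.length
    · have hdrop : cs.drop index = cs[index] :: cs.drop (index + 1) :=
        List.drop_eq_getElem_cons hlt
      by_cases hbs : cs[index] = '\\' ∧ index + 1 < cs.length
      · obtain ⟨hc, h1⟩ := hbs
        have hdrop1 : cs.drop (index + 1) = cs[index + 1] :: cs.drop (index + 2) :=
          List.drop_eq_getElem_cons h1
        rw [applyEscapesGo, dif_pos hlt, dif_pos ⟨hc, h1⟩,
          ih cs (index + 2) _ (by omega), hdrop, hdrop1]
        conv_rhs => rw [hc, pvRef_bs_cons]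
        rw [getD_pvEscMap]
        split_ifs <;> simp
      · rw [applyEscapesGo, dif_pos hlt, dif_neg hbs,
          ih cs (index + 1) _ (by omega), hdrop]
        by_cases hc : cs[index] = '\\'
        · have h1 : ¬ index + 1 < cs.length := fun h' => hbs ⟨hc, h'⟩
          rw [List.drop_eq_nil_of_le (show cs.length ≤ index + 1 by omega)]
          conv_rhs => rw [hc]
          simp [pvRef, hc]
        · rw [pvRef_cons_ne _ _ hc]
          simp
    · rw [applyEscapesGo, dif_neg hlt, List.drop_eq_nil_of_le (by omega)]
      simp [pvRef]

theorem pvSplit_ne_nil (cs : List Char) : pvSplit cs ≠ [] := by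
  cases cs with
  | nil => simp [pvSplit]
  | cons c rest =>
    simp only [pvSplit]
    split_ifs
    · simp
    · cases pvSplit rest <;> simp

-- splitOn's fueled worker equals pvSplit (glued onto the current-piece/acc state)
theorem splitOn_go_eq (fuel : Nat) :
    ∀ (l cur : List Char) (acc : List (List Char)), l.length ≤ fuel →
      PySem.Chars.splitOn.go ['\\'] fuel l cur acc =
        acc.reverse ++
          (match pvSplit l with
           | [] => [cur.reverse]
           | p :: ps => (cur.reverse ++ p) :: ps) := by
  induction fuel with
  | zero =>
    intro l cur acc h
    have : l = [] := List.eq_nil_of_length_eq_zero (by omega)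
    subst this
    simp [PySem.Chars.splitOn.go, pvSplit]
  | succ fuel ih =>
    intro l cur acc h
    cases l with
    | nil => simp [PySem.Chars.splitOn.go, pvSplit]
    | cons c rest =>
      rw [PySem.Chars.splitOn.go]
      by_cases hc : c = '\\'
      · subst hc
        have hpre : List.isPrefixOf ['\\'] ('\\' :: rest) = true := by
          simp [List.isPrefixOf]
        rw [if_pos hpre]
        have : List.drop (List.length ['\\']) ('\\' :: rest) = rest := by simp
        rw [this, ih rest [] _ (by simpa using Nat.le_of_succ_le_succ (by simpa using h))]
        rw [show pvSplit ('\\' :: rest) = [] :: pvSplit rest by rw [pvSplit.eq_def]; simp]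
        cases hps : pvSplit rest with
        | nil => exact absurd hps (pvSplit_ne_nil rest)
        | cons p ps => simp
      · have hpre : List.isPrefixOf ['\\'] (c :: rest) = false := by
          simp [List.isPrefixOf]
          exact fun h => hc h.symm
        rw [if_neg (by simp [hpre])]
        rw [ih rest (c :: cur) _ (by simpa using Nat.le_of_succ_le_succ (by simpa using h))]
        rw [show pvSplit (c :: rest) = (match pvSplit rest with
              | [] => [[c]] | p :: ps => (c :: p) :: ps) by rw [pvSplit.eq_def]; simp [hc]]
        cases hps : pvSplit rest with
        | nil => exact absurd hps (pvSplit_ne_nil rest)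
        | cons p ps => simp

theorem splitOn_eq_pvSplit (cs : List Char) :
    PySem.Chars.splitOn cs ['\\'] = pvSplit cs := by
  rw [PySem.Chars.splitOn, splitOn_go_eq (cs.length + 1) cs [] [] (by omega)]
  cases hps : pvSplit cs with
  | nil => exact absurd hps (pvSplit_ne_nil cs)
  | cons p ps => simp

-- unfolding lemmas for the reassembly loop
theorem join_nilpart (ps : List (List Char)) :
    applyEscapesAltJoin ([] :: ps) =
      (match ps with
       | [] => ['\\']
       | q :: ps' => ('\\' :: q) ++ applyEscapesAltJoin ps') := by
  rw [applyEscapesAltJoin.eq_def]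
  cases ps <;> simp

theorem join_conspart (c : Char) (p : List Char) (ps : List (List Char)) :
    applyEscapesAltJoin ((c :: p) :: ps) =
      (PySem.Dict.getD pvEscMap c c :: p) ++ applyEscapesAltJoin ps := by
  rw [applyEscapesAltJoin.eq_def]
  simp

-- mutual glue: reassembling the split pieces gives the reference one-pass result
theorem glue_eq_pvRef (cs : List Char) :
    (match pvSplit cs with
     | [] => []
     | p :: ps => p ++ applyEscapesAltJoin ps) = pvRef cs ∧
    applyEscapesAltJoin (pvSplit cs) =
      (match cs with
       | [] => ['\\']
       | d :: rest => PySem.Dict.getD pvEscMap d d :: pvRef rest) := by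
  induction cs with
  | nil =>
    refine ⟨by simp [pvSplit, applyEscapesAltJoin, pvRef], ?_⟩
    simp [pvSplit, applyEscapesAltJoin]
  | cons c rest ih =>
    obtain ⟨ih1, ih2⟩ := ih
    by_cases hc : c = '\\'
    · subst hc
      have hsplit : pvSplit ('\\' :: rest) = [] :: pvSplit rest := by
        simp [pvSplit]
      have hbsD : PySem.Dict.getD pvEscMap '\\' '\\' = '\\' := by decide
      refine ⟨?_, ?_⟩
      · rw [hsplit]
        show [] ++ applyEscapesAltJoin (pvSplit rest) = pvRef ('\\' :: rest)
        rw [List.nil_append, ih2]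
        cases rest with
        | nil => simp [pvRef]
        | cons d rest2 => rw [pvRef_bs_cons]
      · rw [hsplit, join_nilpart]
        cases hps : pvSplit rest with
        | nil => exact absurd hps (pvSplit_ne_nil rest)
        | cons q ps =>
          have hglue : q ++ applyEscapesAltJoin ps = pvRef rest := by
            rw [hps] at ih1; exact ih1
          show ('\\' :: q) ++ applyEscapesAltJoin ps =
            PySem.Dict.getD pvEscMap '\\' '\\' :: pvRef rest
          rw [hbsD, List.cons_append, hglue]
    · have hsplit : pvSplit (c :: rest) =
          (match pvSplit rest with
           | [] => [[c]]
           | p :: ps => (c :: p) :: ps) := by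
        rw [pvSplit.eq_def]; simp [hc]
      cases hps : pvSplit rest with
      | nil => exact absurd hps (pvSplit_ne_nil rest)
      | cons p ps =>
        rw [hps] at hsplit
        have hglue : p ++ applyEscapesAltJoin ps = pvRef rest := by
          rw [hps] at ih1; exact ih1
        refine ⟨?_, ?_⟩
        · rw [hsplit]
          show (c :: p) ++ applyEscapesAltJoin ps = pvRef (c :: rest)
          rw [pvRef_cons_ne _ _ hc, List.cons_append, hglue]
        · rw [hsplit, join_conspart]
          show (PySem.Dict.getD pvEscMap c c :: p) ++ applyEscapesAltJoin ps =
            PySem.Dict.getD pvEscMap c c :: pvRef rest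
          rw [List.cons_append, hglue]

-- ===== VERDICT (by name: the statement is the Claim_ definition above) =====
theorem applyEscapes_spec : Claim_equal_applyEscapes := by
  intro source _
  unfold Spec_applyEscapes applyEscapes applyEscapes_alt
  rw [applyEscapesGo_eq source.toList.length source.toList 0 [] (by omega)]
  rw [splitOn_eq_pvSplit]
  have hg := (glue_eq_pvRef source.toList).1
  cases hps : pvSplit source.toList with
  | nil => exact absurd hps (pvSplit_ne_nil _)
  | cons p ps =>
    rw [hps] at hg
    have hg' : p ++ applyEscapesAltJoin ps = pvRef source.toList := hg
    rw [List.drop_zero]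
    show String.ofList (pvRef source.toList) = String.ofList (p ++ applyEscapesAltJoin ps)
    rw [hg']
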